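-- pv_equiv track=rewrite | github.com/johnnyapu15/server | loltoto_proj/frame/views.py | getMultiList
-- ===== SOURCE A (Python) =====
-- def getMatch(_participants):
--     return int(_participants / 2)
--
-- def getMultiList(_participants):
--     multi = list()
--     p = _participants
--     tmp = p - 1
--     r = 1
--     while (p > 1):
--         for i in range(0, getMatch(p)):
--             multi.append([r, tmp])
--             tmp -= 1
--         p = p - getMatch(p)
--         r += 1
--     return multi
-- ===== SOURCE B (Python) =====
-- def getMultiList(_participants):
--     # Phase 1: per-round match counts.
--     sizes = []
--     p = _participants
--     while p > 1:
--         m = int(p / 2)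
--         sizes.append(m)
--         p -= m
--     # Phase 2: flat round-label sequence.
--     labels = []
--     for r, s in enumerate(sizes, start=1):
--         labels.extend([r] * s)
--     # Phase 3: second coordinate counts down from _participants-1.
--     return [[lab, _participants - 1 - i] for i, lab in enumerate(labels)]
-- ===== Notes on version B (the rewrite author's own statement) =====
-- stated objective: alternative
-- what changed: Replaces A's single interleaved nested loop (mutating tmp across rounds) by three separate passes: compute the per-round match counts with the halving recurrence, expand them into a flat round-label list, then emit pairs in one comprehension using the global index (second coordinate is just _participants-1-i).
import Mathlib
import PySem

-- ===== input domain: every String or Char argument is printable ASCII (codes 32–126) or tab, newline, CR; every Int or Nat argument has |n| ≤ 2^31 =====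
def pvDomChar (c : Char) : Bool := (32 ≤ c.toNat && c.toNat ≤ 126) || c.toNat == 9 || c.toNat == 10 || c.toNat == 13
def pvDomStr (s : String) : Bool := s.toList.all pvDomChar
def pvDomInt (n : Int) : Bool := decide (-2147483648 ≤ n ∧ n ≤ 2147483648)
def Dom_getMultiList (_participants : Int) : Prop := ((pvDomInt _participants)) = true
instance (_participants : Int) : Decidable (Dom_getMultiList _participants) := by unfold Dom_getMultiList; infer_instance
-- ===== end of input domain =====

-- B separates A's interleaved nested loop into three passes (round sizes, flat labels, pair emission); alternative decomposition, same cost.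

-- termination helper for both ports' halving loops (cited in decreasing_by)
theorem pvHalf_lt (p : Int) (h : 1 < p) : (p - p.tdiv 2).toNat < p.toNat := by
  have := Int.tdiv_eq_ediv_of_nonneg (a := p) (b := 2) (by omega)
  omega

-- ===== PORT A =====
-- int(p/2): float division then truncation toward zero; exact (= Int.tdiv) for |p| ≤ 2^31
def getMatch (p : Int) : Int := p.tdiv 2

def getMultiListLoop (p tmp r : Int) (multi : List (List Int)) : List (List Int) :=
  if 1 < p then
    let st := (PySem.List.pyRange 0 (getMatch p) 1).foldl
      (fun (st : List (List Int) × Int) _ => (st.1 ++ [[r, st.2]], st.2 - 1)) (multi, tmp)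
    getMultiListLoop (p - getMatch p) st.2 (r + 1) st.1
  else multi
termination_by p.toNat
decreasing_by exact pvHalf_lt p (by omega)

def getMultiList (_participants : Int) : List (List Int) :=
  getMultiListLoop _participants (_participants - 1) 1 []

-- ===== PORT B =====
def altSizes (p : Int) : List Int :=
  if 1 < p then
    let m := p.tdiv 2
    m :: altSizes (p - m)
  else []
termination_by p.toNat
decreasing_by exact pvHalf_lt p (by omega)

def getMultiList_alt (_participants : Int) : List (List Int) :=
  let sizes := altSizes _participants
  let labels := (PySem.List.enumerate sizes 1).foldl
    (fun acc rs => acc ++ List.replicate rs.2.toNat rs.1) []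
  (PySem.List.enumerate labels 0).map (fun il => [il.2, _participants - 1 - il.1])

-- ===== PRECONDITION & SPEC =====
def Spec_getMultiList (_participants : Int) (out : List (List Int)) : Prop := out = getMultiList_alt _participants
instance (_participants : Int) (out : List (List Int)) : Decidable (Spec_getMultiList _participants out) := by unfold Spec_getMultiList; infer_instance

-- ===== CLAIM (what is proved, stated in full; the proofs are below) =====
def Claim_equal_getMultiList : Prop := ∀ (_participants : Int), Dom_getMultiList _participants → Spec_getMultiList _participants (getMultiList _participants)

-- ===== LEMMAS AND PROOFS =====

-- the pair stream emitted from a label list, second coordinate counting down from t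
def pvPairs : List Int → Int → List (List Int)
  | [], _ => []
  | x :: xs, t => [x, t] :: pvPairs xs (t - 1)

-- labels of the rounds of a size list, first round labelled r
def pvLabels : List Int → Int → List Int
  | [], _ => []
  | s :: rest, r => List.replicate s.toNat r ++ pvLabels rest (r + 1)

theorem pvPairs_append (l1 l2 : List Int) (t : Int) :
    pvPairs (l1 ++ l2) t = pvPairs l1 t ++ pvPairs l2 (t - l1.length) := by
  induction l1 generalizing t with
  | nil => simp [pvPairs]
  | cons x xs ih => simp [pvPairs, ih, sub_sub]; ring_nf

theorem pvEnum_map_pairs (l : List Int) (k t : Int) :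
    (PySem.List.enumerate l k).map (fun il => [il.2, t - il.1]) = pvPairs l (t - k) := by
  induction l generalizing k with
  | nil => simp [PySem.List.enumerate_nil, pvPairs]
  | cons x xs ih =>
      simp only [PySem.List.enumerate_cons, List.map_cons, pvPairs, ih]
      have h : t - (k + 1) = t - k - 1 := by ring
      rw [h]

theorem pvEnum_flatMap_labels (sizes : List Int) (k : Int) :
    (PySem.List.enumerate sizes k).flatMap (fun rs => List.replicate rs.2.toNat rs.1)
      = pvLabels sizes k := by
  induction sizes generalizing k with
  | nil => simp [PySem.List.enumerate_nil, pvLabels]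
  | cons s rest ih => simp [PySem.List.enumerate_cons, pvLabels, ih]

theorem pvInner_foldl (r : Int) (xs : List Int) (multi : List (List Int)) (tmp : Int) :
    xs.foldl (fun (st : List (List Int) × Int) _ => (st.1 ++ [[r, st.2]], st.2 - 1)) (multi, tmp)
      = (multi ++ pvPairs (List.replicate xs.length r) tmp, tmp - xs.length) := by
  induction xs generalizing multi tmp with
  | nil => simp [pvPairs]
  | cons x xs ih =>
      simp only [List.foldl_cons, ih, List.length_cons, List.replicate_succ, pvPairs,
        Prod.mk.injEq]
      refine ⟨by simp, by push_cast; ring⟩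

theorem pvLoop_eq (p tmp r : Int) (multi : List (List Int)) :
    getMultiListLoop p tmp r multi = multi ++ pvPairs (pvLabels (altSizes p) r) tmp := by
  induction p, tmp, r, multi using getMultiListLoop.induct with
  | case1 p tmp r multi h st ih =>
      have hm : 1 ≤ p.tdiv 2 := by
        have := Int.tdiv_eq_ediv_of_nonneg (a := p) (b := 2) (by omega)
        omega
      rw [getMultiListLoop, if_pos h]
      show getMultiListLoop _ st.2 _ st.1 = _
      have hst : st = (multi ++ pvPairs (List.replicate (getMatch p).toNat r) tmp,
          tmp - (getMatch p).toNat) := by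
        show (PySem.List.pyRange 0 (getMatch p) 1).foldl _ _ = _
        rw [pvInner_foldl]
        rw [PySem.List.length_pyRange_one]
        simp
      rw [hst] at ih ⊢
      simp only [ih]
      rw [show altSizes p = p.tdiv 2 :: altSizes (p - p.tdiv 2) from by
        rw [altSizes, if_pos h]]
      simp [getMatch, pvLabels, pvPairs_append, List.append_assoc]
  | case2 p tmp r multi h =>
      rw [getMultiListLoop, if_neg h, altSizes, if_neg h]
      simp [pvLabels, pvPairs]

-- ===== VERDICT (by name: the statement is the Claim_ definition above) =====
theorem pvAlt_eq (n : Int) : getMultiList_alt n =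
    (PySem.List.enumerate ((PySem.List.enumerate (altSizes n) 1).foldl
      (fun acc rs => acc ++ List.replicate rs.2.toNat rs.1) []) 0).map
      (fun il => [il.2, n - 1 - il.1]) := rfl

theorem getMultiList_spec : Claim_equal_getMultiList := by
  intro n _
  unfold Spec_getMultiList getMultiList
  rw [pvLoop_eq, List.nil_append, pvAlt_eq]
  rw [PySem.List.foldl_append_eq_flatMap, List.nil_append, pvEnum_flatMap_labels]
  have := pvEnum_map_pairs (pvLabels (altSizes n) 1) 0 (n - 1)
  simp only [sub_zero] at this
  rw [← this]
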